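-- pv_equiv track=rewrite | github.com/emirdemirel/ASA_ICASSP2021 | a2l/local/extend_lexicon.py | process_alphabetic
-- ===== SOURCE A (Python) =====
-- def process_alphabetic(words):
--     numbers=['1','2','3','4','5','6','7','8','9','0']; numbers=set(numbers)
--     lex_1 = []; symbols = []; lex_words = []
--     for i in range(len(words)):
--         word = words[i].replace('\n','')
--         if word.startswith("'"):
--             word_noap = word[1:]
--         else:
--             word_noap = word
--         chars = list(word); chars_string = ''
--         for i in range(len(chars)):
--             if i > 0:
--                 if chars[i-1] in numbers:
--                     if chars[i] in numbers:
--                         chars_string = chars_string + chars[i]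
--                     else:
--                         chars_string = chars_string + ' ' + chars[i]
--                 else:
--                     chars_string = chars_string + ' ' + chars[i]
--             else:
--                 chars_string = chars_string + ' ' + chars[i]
--         lex_1.append((word + chars_string))
--     return lex_1
-- ===== SOURCE B (Python) =====
-- def process_alphabetic(words):
--     DIGITS = '0123456789'
--
--     def tokenize(s):
--         # group each maximal digit run into one token; every other char is its own token
--         toks = []
--         i = 0
--         while i < len(s):
--             if s[i] in DIGITS:
--                 j = i + 1
--                 while j < len(s) and s[j] in DIGITS:
--                     j += 1
--                 toks.append(s[i:j])
--                 i = j
--             else: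
--                 toks.append(s[i])
--                 i += 1
--         return toks
--
--     def fmt(w):
--         w = w.replace('\n', '')
--         return w + ''.join(' ' + t for t in tokenize(w))
--
--     return [fmt(w) for w in words]
-- ===== Notes on version B (the rewrite author's own statement) =====
-- stated objective: alternative
-- what changed: B tokenizes each cleaned word into maximal digit runs up front (span/scan) and builds the output with one join over the tokens, instead of A's per-character loop that re-checks the predecessor index inside the accumulation.
import Mathlib
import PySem

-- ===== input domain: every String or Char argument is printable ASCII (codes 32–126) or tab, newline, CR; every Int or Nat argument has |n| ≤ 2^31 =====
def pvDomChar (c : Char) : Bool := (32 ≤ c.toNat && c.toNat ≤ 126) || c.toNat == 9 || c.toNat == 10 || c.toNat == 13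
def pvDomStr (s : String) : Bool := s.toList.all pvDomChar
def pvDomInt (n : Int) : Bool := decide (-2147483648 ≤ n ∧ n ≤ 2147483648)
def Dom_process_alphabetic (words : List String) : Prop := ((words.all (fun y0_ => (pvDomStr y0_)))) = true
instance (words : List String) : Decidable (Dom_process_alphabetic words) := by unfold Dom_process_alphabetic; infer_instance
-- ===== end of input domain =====

-- B tokenizes each word into maximal digit runs up front and joins once, instead of A's
-- per-character predecessor-index check; alternative algorithm, same output.


-- ===== PORT A =====
-- numbers = set(['1',...,'0'])
def pvNumbers : PySem.Set Char := PySem.Set.ofList ['1','2','3','4','5','6','7','8','9','0']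

-- the inner 'for i in range(len(chars))' loop building chars_string (on the List Char side);
-- indices i and i-1 are always in range, so pyGetD's default is never read
def pvInnerA (chars : List Char) : List Char :=
  (PySem.List.pyRange 0 chars.length 1).foldl
    (fun cs i =>
      if 0 < i then
        if pvNumbers.contains (PySem.List.pyGetD chars (i - 1) ' ') then
          if pvNumbers.contains (PySem.List.pyGetD chars i ' ') then
            cs ++ [PySem.List.pyGetD chars i ' ']
          else
            cs ++ (' ' :: [PySem.List.pyGetD chars i ' '])
        else
          cs ++ (' ' :: [PySem.List.pyGetD chars i ' '])
      else
        cs ++ (' ' :: [PySem.List.pyGetD chars i ' '])) []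

-- A's 'symbols', 'lex_words' and 'word_noap' are computed but never used (dead code): omitted
def process_alphabetic (words : List String) : List String :=
  (PySem.List.pyRange 0 words.length 1).foldl
    (fun lex1 i =>
      let word := PySem.Chars.replace (PySem.List.pyGetD words i "").toList ['\n'] []
      lex1 ++ [String.ofList (word ++ pvInnerA word)]) []

-- ===== PORT B =====
def pvDigits : List Char := ['0','1','2','3','4','5','6','7','8','9']

-- the inner 'while j < len(s) and s[j] in DIGITS' scan: maximal digit prefix and remainder
def pvGrab : List Char → List Char × List Char
  | [] => ([], [])
  | c :: cs =>
    if pvDigits.contains c then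
      let p := pvGrab cs
      (c :: p.1, p.2)
    else ([], c :: cs)

theorem pvGrab_snd_le (cs : List Char) : (pvGrab cs).2.length ≤ cs.length := by
  induction cs with
  | nil => simp [pvGrab]
  | cons c cs ih =>
    simp only [pvGrab]
    split
    · exact Nat.le_succ_of_le ih
    · simp

-- tokenize: each maximal digit run is one token, every other char its own token
def pvTokenize : List Char → List (List Char)
  | [] => []
  | c :: cs =>
    if pvDigits.contains c then
      (c :: (pvGrab cs).1) :: pvTokenize (pvGrab cs).2
    else
      [c] :: pvTokenize cs
termination_by cs => cs.length
decreasing_by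
  · exact Nat.lt_succ_of_le (pvGrab_snd_le cs)
  · simp

def process_alphabetic_alt (words : List String) : List String :=
  words.map (fun w =>
    let wl := PySem.Chars.replace w.toList ['\n'] []
    String.ofList (wl ++ (pvTokenize wl).flatMap (fun t => ' ' :: t)))

-- ===== PRECONDITION & SPEC =====
def Spec_process_alphabetic (words : List String) (out : List String) : Prop := out = process_alphabetic_alt words
instance (words : List String) (out : List String) : Decidable (Spec_process_alphabetic words out) := by unfold Spec_process_alphabetic; infer_instance

-- ===== CLAIM (what is proved, stated in full; the proofs are below) =====
def Claim_equal_process_alphabetic : Prop := ∀ (words : List String), Dom_process_alphabetic words → Spec_process_alphabetic words (process_alphabetic words)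

-- ===== LEMMAS AND PROOFS =====

-- both membership tests agree (same ten digits, different literal order / container)
theorem pv_dig_eq (c : Char) : pvNumbers.contains c = pvDigits.contains c := by
  have h : pvNumbers = ['1','2','3','4','5','6','7','8','9','0'] := by decide
  rw [h]
  simp only [PySem.Set.contains, pvDigits, List.contains_eq_mem, List.mem_cons, List.not_mem_nil]
  exact decide_eq_decide.mpr (by tauto)

-- reference shape of the per-word output: a space before every char except inside a digit run
def pvSpec : Bool → List Char → List Char
  | _, [] => []
  | b, c :: cs =>
    (if b && pvDigits.contains c then [c] else [' ', c]) ++ pvSpec (pvDigits.contains c) cs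

theorem pvInnerA_go (chars : List Char) (k : Nat) (acc : List Char) (hk : k ≤ chars.length) :
    (PySem.List.pyRange (k : Int) (chars.length : Int) 1).foldl
      (fun cs i =>
        if 0 < i then
          if pvNumbers.contains (PySem.List.pyGetD chars (i - 1) ' ') then
            if pvNumbers.contains (PySem.List.pyGetD chars i ' ') then
              cs ++ [PySem.List.pyGetD chars i ' ']
            else
              cs ++ (' ' :: [PySem.List.pyGetD chars i ' '])
          else
            cs ++ (' ' :: [PySem.List.pyGetD chars i ' '])
        else
          cs ++ (' ' :: [PySem.List.pyGetD chars i ' '])) acc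
    = acc ++ pvSpec (decide (k ≠ 0) && pvDigits.contains (chars.getD (k - 1) ' ')) (chars.drop k) := by
  by_cases h : k < chars.length
  · rw [PySem.List.pyRange_one_cons (by exact_mod_cast h), List.foldl_cons]
    have hdrop : chars.drop k = chars[k] :: chars.drop (k + 1) := (List.getElem_cons_drop h).symm
    have hget : PySem.List.pyGetD chars (k : Int) ' ' = chars[k] := by
      rw [PySem.List.pyGetD_natCast]
      exact List.getD_eq_getElem chars ' ' h
    have hstep := pvInnerA_go chars (k + 1) (acc ++
      (if (decide (k ≠ 0) && pvDigits.contains (chars.getD (k - 1) ' ')) && pvDigits.contains chars[k]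
        then [chars[k]] else [' ', chars[k]])) h
    rw [Nat.cast_add, Nat.cast_one] at hstep
    have hbody :
        (if 0 < (k : Int) then
          if pvNumbers.contains (PySem.List.pyGetD chars ((k : Int) - 1) ' ') then
            if pvNumbers.contains (PySem.List.pyGetD chars (k : Int) ' ') then
              acc ++ [PySem.List.pyGetD chars (k : Int) ' ']
            else acc ++ (' ' :: [PySem.List.pyGetD chars (k : Int) ' '])
          else acc ++ (' ' :: [PySem.List.pyGetD chars (k : Int) ' '])
        else acc ++ (' ' :: [PySem.List.pyGetD chars (k : Int) ' ']))
        = acc ++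
          (if (decide (k ≠ 0) && pvDigits.contains (chars.getD (k - 1) ' ')) && pvDigits.contains chars[k]
            then [chars[k]] else [' ', chars[k]]) := by
      rcases Nat.eq_zero_or_pos k with hk0 | hk0
      · subst hk0; simp; simpa using hget
      · have h1 : ((k : Int) - 1) = ((k - 1 : Nat) : Int) := by omega
        rw [if_pos (by exact_mod_cast hk0), h1, PySem.List.pyGetD_natCast, hget,
          pv_dig_eq, pv_dig_eq]
        have h2 : decide (k ≠ 0) = true := by simp; omega
        rw [h2, Bool.true_and]
        by_cases hd1 : pvDigits.contains (chars.getD (k - 1) ' ')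
        · rw [hd1, if_pos rfl, Bool.true_and]
          by_cases hd2 : pvDigits.contains chars[k]
          · rw [hd2, if_pos rfl, if_pos rfl]
          · rw [Bool.not_eq_true] at hd2
            rw [hd2, if_neg (by simp), if_neg (by simp)]
        · rw [Bool.not_eq_true] at hd1
          rw [hd1, if_neg (by simp), Bool.false_and, if_neg (by simp)]
    rw [hbody, hstep, hdrop]
    have h3 : decide (k + 1 ≠ 0) = true := by simp
    have h4 : chars.getD (k + 1 - 1) ' ' = chars[k] := by
      simpa using List.getD_eq_getElem chars ' ' h
    rw [h3, h4, Bool.true_and]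
    conv_rhs => rw [pvSpec]
    simp [List.append_assoc]
  · have hnil : PySem.List.pyRange (k : Int) (chars.length : Int) 1 = [] :=
      PySem.List.pyRange_one_eq_nil (by exact_mod_cast Nat.le_of_not_lt h)
    have hd : chars.drop k = [] := List.drop_eq_nil_of_le (Nat.le_of_not_lt h)
    rw [hnil, hd, List.foldl_nil]
    simp [pvSpec]
termination_by chars.length - k
decreasing_by omega

theorem pvInnerA_eq_spec (chars : List Char) : pvInnerA chars = pvSpec false chars := by
  have := pvInnerA_go chars 0 [] (Nat.zero_le _)
  simpa [pvInnerA] using this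

theorem pvSpec_true_grab (cs : List Char) :
    pvSpec true cs = (pvGrab cs).1 ++ pvSpec false (pvGrab cs).2 := by
  induction cs with
  | nil => simp [pvSpec, pvGrab]
  | cons c cs ih =>
    by_cases h : c ∈ pvDigits
    · simp [pvSpec, pvGrab, h, ih]
    · simp [pvSpec, pvGrab, h]

theorem pvTokenize_spec : ∀ cs : List Char,
    (pvTokenize cs).flatMap (fun t => ' ' :: t) = pvSpec false cs
  | [] => by simp [pvTokenize, pvSpec]
  | c :: cs => by
    by_cases h : c ∈ pvDigits
    · have ih := pvTokenize_spec (pvGrab cs).2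
      simp [pvTokenize, pvSpec, h, ih, pvSpec_true_grab]
    · have ih := pvTokenize_spec cs
      simp [pvTokenize, pvSpec, h, ih]
termination_by cs => cs.length
decreasing_by
  · exact Nat.lt_succ_of_le (pvGrab_snd_le cs)
  · simp

-- ===== VERDICT (by name: the statement is the Claim_ definition above) =====
theorem process_alphabetic_spec : Claim_equal_process_alphabetic := by
  intro words _
  unfold Spec_process_alphabetic process_alphabetic process_alphabetic_alt
  rw [PySem.List.foldl_pyRange_zero_pyGetD' words ""
    (fun lex1 w =>
      lex1 ++ [String.ofList ((PySem.Chars.replace w.toList ['\n'] []) ++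
        pvInnerA (PySem.Chars.replace w.toList ['\n'] []))]) [],
    PySem.List.foldl_append_singleton_eq_map, List.nil_append]
  refine List.map_congr_left (fun w _ => ?_)
  rw [pvInnerA_eq_spec, ← pvTokenize_spec]
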